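-- pv_equiv track=rewrite | github.com/felis2803/tables | src/steps/node_filter.py | build_subset_support
-- ===== SOURCE A (Python) =====
-- from collections import Counter, defaultdict, deque
-- from itertools import combinations
--
-- def build_subset_support(tables: list[dict]) -> dict[tuple[int, ...], list[int]]:
--     subset_to_tables: dict[tuple[int, ...], list[int]] = defaultdict(list)
--
--     for table_index, table in enumerate(tables):
--         bits = table["bits"]
--         for subset_size in range(2, len(bits) + 1):
--             for subset_indices in combinations(range(len(bits)), subset_size):
--                 subset_bits = tuple(bits[index] for index in subset_indices)
--                 subset_to_tables[subset_bits].append(table_index)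
--
--     return subset_to_tables
-- ===== SOURCE B (Python) =====
-- from collections import defaultdict
--
--
-- def build_subset_support(tables: list[dict]) -> dict[tuple[int, ...], list[int]]:
--     subset_to_tables: dict[tuple[int, ...], list[int]] = defaultdict(list)
--
--     for table_index, table in enumerate(tables):
--         bits = table["bits"]
--         n = len(bits)
--         # breadth-first frontier expansion: level k holds all k-element
--         # subsets (as bit-value tuples, with the last chosen index) in
--         # lexicographic index order; each level extends the previous one.
--         frontier = [((), -1)]
--         for level in range(1, n + 1):
--             frontier = [
--                 (s + (bits[j],), j)
--                 for (s, last) in frontier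
--                 for j in range(last + 1, n)
--             ]
--             if level >= 2:
--                 for s, _ in frontier:
--                     subset_to_tables[s].append(table_index)
--
--     return subset_to_tables
-- ===== Notes on version B (the rewrite author's own statement) =====
-- stated objective: alternative
-- what changed: A enumerates subsets by nested loops over subset sizes with itertools.combinations; B does one breadth-first frontier expansion per table, where level k holds all k-element subsets (with their last chosen index) and each level is built by extending the previous one with a larger index, appending table_index from level 2 on.
import Mathlib
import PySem

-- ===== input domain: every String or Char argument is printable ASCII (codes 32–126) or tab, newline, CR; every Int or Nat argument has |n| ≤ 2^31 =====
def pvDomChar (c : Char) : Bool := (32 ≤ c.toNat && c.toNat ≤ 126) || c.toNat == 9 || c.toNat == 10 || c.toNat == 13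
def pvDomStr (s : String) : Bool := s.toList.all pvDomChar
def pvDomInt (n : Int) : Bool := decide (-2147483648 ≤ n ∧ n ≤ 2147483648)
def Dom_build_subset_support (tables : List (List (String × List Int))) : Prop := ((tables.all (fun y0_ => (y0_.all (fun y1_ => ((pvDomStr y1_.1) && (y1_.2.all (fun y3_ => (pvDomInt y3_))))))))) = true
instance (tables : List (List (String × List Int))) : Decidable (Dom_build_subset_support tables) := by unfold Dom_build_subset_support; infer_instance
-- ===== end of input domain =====

-- B replaces A's nested size/combinations enumeration by a breadth-first frontier expansion
-- (each level extends the previous level's subsets by one larger index); same cost, different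
-- decomposition ('alternative', no speed claim).

-- ===== PORT A =====
-- per-table body of A's outer loop: for each subset_size and each combination of indices,
-- append table_index (p.1) under the tuple of selected bits
def pvTableA (d : PySem.Dict (List Int) (List Int)) (p : Int × List (String × List Int)) :
    PySem.Dict (List Int) (List Int) :=
  let bits := ((PySem.Dict.mk p.2).get? "bits").getD []   -- table["bits"]; Pre_ excludes the KeyError
  (PySem.List.pyRange 2 ((bits.length : Int) + 1) 1).foldl
    (fun d k =>
      (PySem.List.combinations (PySem.List.pyRange 0 (bits.length : Int) 1) k.toNat).foldl
        (fun d idxs =>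
          d.modify (idxs.map (fun i => PySem.List.pyGetD bits i 0)) [] (· ++ [p.1])) d) d

def build_subset_support (tables : List (List (String × List Int))) : List (List Int × List Int) :=
  ((PySem.List.enumerate tables 0).foldl pvTableA PySem.Dict.empty).items

-- ===== PORT B =====
-- per-table body of B's outer loop: frontier expansion level by level; from level 2 on,
-- append table_index (p.1) under every subset of the new frontier
def pvTableB (d : PySem.Dict (List Int) (List Int)) (p : Int × List (String × List Int)) :
    PySem.Dict (List Int) (List Int) :=
  let bits := ((PySem.Dict.mk p.2).get? "bits").getD []   -- table["bits"]; Pre_ excludes the KeyError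
  let n : Int := bits.length
  ((PySem.List.pyRange 1 (n + 1) 1).foldl
    (fun (st : PySem.Dict (List Int) (List Int) × List (List Int × Int)) level =>
      let fr := st.2.flatMap (fun q =>
        (PySem.List.pyRange (q.2 + 1) n 1).map
          (fun j => (q.1 ++ [PySem.List.pyGetD bits j 0], j)))
      (if 2 ≤ level then fr.foldl (fun d q => d.modify q.1 [] (· ++ [p.1])) st.1 else st.1, fr))
    (d, ([([], -1)] : List (List Int × Int)))).1

def build_subset_support_alt (tables : List (List (String × List Int))) : List (List Int × List Int) :=
  ((PySem.List.enumerate tables 0).foldl pvTableB PySem.Dict.empty).items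

-- ===== PRECONDITION & SPEC =====
-- Pre_ excludes exactly the tables without a "bits" key, on which the Python A raises KeyError.
def Pre_build_subset_support (tables : List (List (String × List Int))) : Prop :=
  (tables.all (fun t => (PySem.Dict.mk t).contains "bits")) = true
instance (tables : List (List (String × List Int))) : Decidable (Pre_build_subset_support tables) := by unfold Pre_build_subset_support; infer_instance

def pvWitness_build_subset_support : (List (List (String × List Int))) :=
  [[("bits", [3, 1, 2])], [("bits", [1, 2])]]

def Spec_build_subset_support (tables : List (List (String × List Int))) (out : List (List Int × List Int)) : Prop := out = build_subset_support_alt tables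
instance (tables : List (List (String × List Int))) (out : List (List Int × List Int)) : Decidable (Spec_build_subset_support tables out) := by unfold Spec_build_subset_support; infer_instance

-- ===== CLAIM (what is proved, stated in full; the proofs are below) =====
def Claim_equal_build_subset_support : Prop := ∀ (tables : List (List (String × List Int))), Dom_build_subset_support tables → Pre_build_subset_support tables → Spec_build_subset_support tables (build_subset_support tables)

-- ===== LEMMAS AND PROOFS =====

-- combinations of size k+1 together with the last chosen element (proof-side bookkeeping)
def combosP : List Int → Nat → List (List Int × Int)
  | [], _ => []
  | x :: t, 0 => ([x], x) :: combosP t 0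
  | x :: t, k + 1 => (combosP t k).map (fun p => (x :: p.1, p.2)) ++ combosP t (k + 1)

lemma combosP_zero (xs : List Int) : combosP xs 0 = xs.map (fun x => ([x], x)) := by
  induction xs with
  | nil => rfl
  | cons x t ih => simp [combosP, ih]

lemma combosP_fst (xs : List Int) (k : Nat) :
    (combosP xs k).map Prod.fst = PySem.List.combinations xs (k + 1) := by
  induction xs generalizing k with
  | nil => cases k <;> simp [combosP, PySem.List.combinations_nil_succ]
  | cons x t ih =>
    cases k with
    | zero => simp [combosP_zero, PySem.List.combinations_one, List.map_map, Function.comp]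
    | succ k =>
      simp only [combosP, PySem.List.combinations_cons_succ, List.map_append, List.map_map,
        ← ih]
      rfl

-- one frontier-expansion step over a range of indices produces the next combination level
lemma combosP_step (n : Int) : ∀ (m : Nat) (a : Int), n - a ≤ m → ∀ k : Nat,
    (combosP (PySem.List.pyRange a n 1) k).flatMap
      (fun p => (PySem.List.pyRange (p.2 + 1) n 1).map (fun j => (p.1 ++ [j], j)))
    = combosP (PySem.List.pyRange a n 1) (k + 1) := by
  intro m
  induction m with
  | zero =>
    intro a ha k
    rw [PySem.List.pyRange_one_eq_nil (by omega)]
    cases k <;> simp [combosP]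
  | succ m ih =>
    intro a ha k
    by_cases h : a < n
    · rw [PySem.List.pyRange_one_cons h]
      cases k with
      | zero =>
        simp only [combosP, List.flatMap_cons]
        rw [ih (a + 1) (by omega) 0]
        simp [combosP_zero, List.map_map, Function.comp]
      | succ k =>
        simp only [combosP, List.flatMap_append, List.flatMap_map]
        have hcomm :
            List.flatMap
              (fun p => List.map (fun j => (a :: p.1 ++ [j], j))
                (PySem.List.pyRange (p.2 + 1) n 1))
              (combosP (PySem.List.pyRange (a + 1) n 1) k)
            = List.map (fun p => (a :: p.1, p.2))
              (List.flatMap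
                (fun p => List.map (fun j => (p.1 ++ [j], j)) (PySem.List.pyRange (p.2 + 1) n 1))
                (combosP (PySem.List.pyRange (a + 1) n 1) k)) := by
          simp [List.map_flatMap, List.map_map, Function.comp_def]
        rw [hcomm, ih (a + 1) (by omega) k, ih (a + 1) (by omega) (k + 1)]
    · rw [PySem.List.pyRange_one_eq_nil (by omega)]
      cases k <;> simp [combosP]

lemma combosP_step' (n a : Int) (k : Nat) :
    (combosP (PySem.List.pyRange a n 1) k).flatMap
      (fun p => (PySem.List.pyRange (p.2 + 1) n 1).map (fun j => (p.1 ++ [j], j)))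
    = combosP (PySem.List.pyRange a n 1) (k + 1) :=
  combosP_step n (n - a).toNat a (Int.self_le_toNat _) k

-- replace the chosen indices by the corresponding bit values, keep the last index
def pvH (bits : List Int) (p : List Int × Int) : List Int × Int :=
  (p.1.map (fun i => PySem.List.pyGetD bits i 0), p.2)

-- B's frontier step commutes with pvH
lemma step_comm (bits : List Int) (n : Int) (F : List (List Int × Int)) :
    (F.map (pvH bits)).flatMap (fun q =>
        (PySem.List.pyRange (q.2 + 1) n 1).map
          (fun j => (q.1 ++ [PySem.List.pyGetD bits j 0], j)))
    = (F.flatMap (fun p =>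
        (PySem.List.pyRange (p.2 + 1) n 1).map (fun j => (p.1 ++ [j], j)))).map (pvH bits) := by
  simp [List.flatMap_map, List.map_flatMap, List.map_map, Function.comp_def, pvH]

lemma loopG (bits : List Int) (ti : Int) : ∀ (m : Nat) (c : Int),
    (bits.length : Int) + 1 - c ≤ m → ∀ (j : Nat), c = (j : Int) + 2 →
    ∀ (d : PySem.Dict (List Int) (List Int)),
    ((PySem.List.pyRange c ((bits.length : Int) + 1) 1).foldl
      (fun (st : PySem.Dict (List Int) (List Int) × List (List Int × Int)) level =>
        let fr := st.2.flatMap (fun q =>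
          (PySem.List.pyRange (q.2 + 1) (bits.length : Int) 1).map
            (fun j => (q.1 ++ [PySem.List.pyGetD bits j 0], j)))
        (if 2 ≤ level then fr.foldl (fun d q => d.modify q.1 [] (· ++ [ti])) st.1 else st.1, fr))
      (d, (combosP (PySem.List.pyRange 0 (bits.length : Int) 1) j).map (pvH bits))).1
    = (PySem.List.pyRange c ((bits.length : Int) + 1) 1).foldl
      (fun d k =>
        (PySem.List.combinations (PySem.List.pyRange 0 (bits.length : Int) 1) k.toNat).foldl
          (fun d idxs =>
            d.modify (idxs.map (fun i => PySem.List.pyGetD bits i 0)) [] (· ++ [ti])) d) d := by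
  intro m
  induction m with
  | zero =>
    intro c hc j hj d
    rw [PySem.List.pyRange_one_eq_nil (show (bits.length : Int) + 1 ≤ c by omega)]
    simp
  | succ m ih =>
    intro c hc j hj d
    by_cases h : c < (bits.length : Int) + 1
    · rw [PySem.List.pyRange_one_cons h]
      simp only [List.foldl_cons]
      have hfr :
          ((combosP (PySem.List.pyRange 0 (bits.length : Int) 1) j).map (pvH bits)).flatMap
            (fun q => (PySem.List.pyRange (q.2 + 1) (bits.length : Int) 1).map
              (fun j => (q.1 ++ [PySem.List.pyGetD bits j 0], j)))
          = (combosP (PySem.List.pyRange 0 (bits.length : Int) 1) (j + 1)).map (pvH bits) := by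
        rw [step_comm, combosP_step']
      have hct : c.toNat = j + 2 := by omega
      simp only [hfr, hct]
      rw [if_pos (show (2 : Int) ≤ c by omega)]
      have hcomb : PySem.List.combinations (PySem.List.pyRange 0 (bits.length : Int) 1) (j + 2)
          = (combosP (PySem.List.pyRange 0 (bits.length : Int) 1) (j + 1)).map Prod.fst :=
        (combosP_fst _ (j + 1)).symm
      rw [hcomb]
      simp only [List.foldl_map, pvH]
      exact ih (c + 1) (by omega) (j + 1) (by omega) _
    · rw [PySem.List.pyRange_one_eq_nil (show (bits.length : Int) + 1 ≤ c by omega)]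
      simp

-- the per-table bodies agree
lemma table_eq (d : PySem.Dict (List Int) (List Int)) (p : Int × List (String × List Int)) :
    pvTableB d p = pvTableA d p := by
  unfold pvTableA pvTableB
  dsimp only
  by_cases hb : ((((PySem.Dict.mk p.2).get? "bits").getD []).length : Int) < 1
  · rw [PySem.List.pyRange_one_eq_nil
        (show ((((PySem.Dict.mk p.2).get? "bits").getD []).length : Int) + 1 ≤ 1 by omega),
      PySem.List.pyRange_one_eq_nil
        (show ((((PySem.Dict.mk p.2).get? "bits").getD []).length : Int) + 1 ≤ 2 by omega)]
    simp
  · rw [PySem.List.pyRange_one_cons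
        (show (1 : Int) < ((((PySem.Dict.mk p.2).get? "bits").getD []).length : Int) + 1 by omega)]
    simp only [List.foldl_cons]
    rw [if_neg (by omega : ¬ (2 : Int) ≤ 1)]
    have h1 : ([(([] : List Int), (-1 : Int))]).flatMap (fun q =>
          (PySem.List.pyRange (q.2 + 1) ((((PySem.Dict.mk p.2).get? "bits").getD []).length : Int) 1).map
            (fun j => (q.1 ++ [PySem.List.pyGetD (((PySem.Dict.mk p.2).get? "bits").getD []) j 0], j)))
        = (combosP (PySem.List.pyRange 0 ((((PySem.Dict.mk p.2).get? "bits").getD []).length : Int) 1) 0).map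
            (pvH (((PySem.Dict.mk p.2).get? "bits").getD [])) := by
      norm_num [combosP_zero, List.map_map, Function.comp_def, pvH]
    rw [h1]
    exact loopG (((PySem.Dict.mk p.2).get? "bits").getD []) p.1
      (((((PySem.Dict.mk p.2).get? "bits").getD []).length : Int) - 1).toNat 2
      (by have := Int.self_le_toNat (((((PySem.Dict.mk p.2).get? "bits").getD []).length : Int) - 1); omega)
      0 (by norm_num) d

-- ===== VERDICT (by name: the statement is the Claim_ definition above) =====
theorem build_subset_support_spec : Claim_equal_build_subset_support := by
  intro tables _ _
  unfold Spec_build_subset_support build_subset_support build_subset_support_alt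
  have h : List.foldl pvTableA PySem.Dict.empty (PySem.List.enumerate tables)
      = List.foldl pvTableB PySem.Dict.empty (PySem.List.enumerate tables) :=
    PySem.List.foldl_congr_mem (PySem.List.enumerate tables) pvTableA pvTableB
      PySem.Dict.empty (fun acc x _ => (table_eq acc x).symm)
  rw [h]
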